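-- pv_equiv track=rewrite | github.com/jaydenlin231/sokoban-solver | mySokobanSolver.py | space_in_line
-- ===== SOURCE A (Python) =====
-- def are_inline_vert(coords_a, coords_b):
--     """
--     Determine if a tuple representing (x,y) coordinates is vertically in line with
--     another (x,y) coordinates tuple
--
--     @param coords_a:
--         A tuple representing (x,y) coordinates
--
--     @param coords_b:
--         Another tuple representing (x,y) coordinates
--
--     @return:
--        True if the two specified coordinates tuples are vertically in line,
--        meaning the x coordinates are the same between the tuples.
--        False otherswise.
--
--     """
--     return coords_a[0] == coords_b[0]
--
-- def are_inline_hor(coords_a, coords_b):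
--     """
--     Determine if a tuple representing (x,y) coordinates is horizontally in line with
--     another (x,y) coordinates tuple.
--
--     @param coords_a:
--         A tuple representing (x,y) coordinates
--
--     @param coords_b:
--         Another tuple representing (x,y) coordinates
--
--     @return:
--        True if the two specified coordinates tuples are horizontally in line,
--        meaning the y coordinates are the same between the tuples.
--        False otherswise.
--
--     """
--     return coords_a[1] == coords_b[1]
--
-- def space_in_line(coords_a, coords_b):
--     """
--     Returns the set of (x, y) tuples which contains pairs of coordinates in between
--     the two specified (x, y) coordinates tuples
--
--     @param coords_a:
--         A tuple representing (x,y) coordinates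
--
--     @param coords_b:
--         Another tuple representing (x,y) coordinates
--
--     @return:
--         A set containing (x, y) tuples which represents pairs of coordinates in between
--         the two specified (x, y) coordinates tuples, if they are either
--         vertically or horizontally in line.
--
--         None, if coords_a and coords_b are not in line, or have no space in between
--         (i.e. directly neighbours).
--
--     """
--     if are_inline_hor(coords_a, coords_b):
--         # y same if aligned horizontally
--         y = coords_a[1]
--         # Inclusive
--         x_start = min(coords_a[0], coords_b[0]) + 1
--         # Exclusive
--         x_end = max(coords_a[0], coords_b[0])
--         if x_start < x_end:
--             return {(x, y) for x in range(x_start, x_end)}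
--
--     elif are_inline_vert(coords_a, coords_b):
--         # x same if aligned vertically
--         x = coords_a[0]
--         # Inclusive
--         y_start = min(coords_a[1], coords_b[1]) + 1
--         # Exclusive
--         y_end = max(coords_a[1], coords_b[1])
--         if y_start < y_end:
--             return {(x, y) for y in range(y_start, y_end)}
--
--     # Not in line, or have no space in between
--     return None
-- ===== SOURCE B (Python) =====
-- def _mids(lo, hi):
--     # Sorted integers strictly between lo and hi, built by recursive
--     # midpoint splitting (divide and conquer), not by enumerating a range.
--     if hi - lo < 2:
--         return []
--     m = (lo + hi) // 2
--     return _mids(lo, m) + [m] + _mids(m, hi)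
--
-- def space_in_line(coords_a, coords_b):
--     (ax, ay), (bx, by) = coords_a, coords_b
--     if ax != bx and ay != by:
--         return None
--     if ay == by:
--         pts = [(x, ay) for x in _mids(min(ax, bx), max(ax, bx))]
--     else:
--         pts = [(ax, y) for y in _mids(min(ay, by), max(ay, by))]
--     return set(pts) if pts else None
-- ===== Notes on version B (the rewrite author's own statement) =====
-- stated objective: alternative
-- what changed: The strictly-between coordinates are built by a recursive divide-and-conquer on the midpoint ((lo+hi)//2), concatenating the two recursively solved halves around the midpoint, instead of enumerating a min/max range in one comprehension.
import Mathlib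
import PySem

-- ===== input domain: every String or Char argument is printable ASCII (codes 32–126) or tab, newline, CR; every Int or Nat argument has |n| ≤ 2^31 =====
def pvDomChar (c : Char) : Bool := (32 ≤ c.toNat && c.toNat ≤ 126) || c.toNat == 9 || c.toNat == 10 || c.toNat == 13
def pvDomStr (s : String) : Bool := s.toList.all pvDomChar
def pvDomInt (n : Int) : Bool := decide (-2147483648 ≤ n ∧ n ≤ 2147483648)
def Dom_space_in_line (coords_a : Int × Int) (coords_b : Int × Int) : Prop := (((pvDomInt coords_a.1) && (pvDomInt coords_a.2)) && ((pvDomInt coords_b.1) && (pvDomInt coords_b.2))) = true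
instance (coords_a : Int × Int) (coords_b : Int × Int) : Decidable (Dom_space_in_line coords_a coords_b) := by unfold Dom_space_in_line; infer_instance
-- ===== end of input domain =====

-- B builds the strictly-between coordinates by recursive midpoint divide-and-conquer
-- instead of enumerating a min/max range (alternative decomposition, same result).

-- ===== PORT A =====
-- are_inline_hor / are_inline_vert inlined as the equality tests they return
def space_in_line (coords_a : Int × Int) (coords_b : Int × Int) : Option (List (Int × Int)) :=
  if coords_a.2 = coords_b.2 then
    -- y same if aligned horizontally
    let y := coords_a.2
    let x_start := min coords_a.1 coords_b.1 + 1
    let x_end := max coords_a.1 coords_b.1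
    if x_start < x_end then
      some (PySem.Set.ofList ((PySem.List.pyRange x_start x_end 1).map (fun x => (x, y))))
    else none
  else if coords_a.1 = coords_b.1 then
    let x := coords_a.1
    let y_start := min coords_a.2 coords_b.2 + 1
    let y_end := max coords_a.2 coords_b.2
    if y_start < y_end then
      some (PySem.Set.ofList ((PySem.List.pyRange y_start y_end 1).map (fun y => (x, y))))
    else none
  else none

-- ===== PORT B =====
-- _mids: sorted integers strictly between lo and hi, by recursive midpoint splitting
def pvMids (lo hi : Int) : List Int :=
  if _h : hi - lo < 2 then []
  else
    let m := PySem.Int.floordiv (lo + hi) 2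
    pvMids lo m ++ m :: pvMids m hi
termination_by (hi - lo).toNat
decreasing_by
  all_goals
    simp only [PySem.Int.floordiv_eq_ediv_of_pos (by omega : (0:Int) < 2)]
    omega

def space_in_line_alt (coords_a : Int × Int) (coords_b : Int × Int) : Option (List (Int × Int)) :=
  if coords_a.1 ≠ coords_b.1 ∧ coords_a.2 ≠ coords_b.2 then none
  else if coords_a.2 = coords_b.2 then
    let pts := (pvMids (min coords_a.1 coords_b.1) (max coords_a.1 coords_b.1)).map
      (fun x => (x, coords_a.2))
    if pts = [] then none else some (PySem.Set.ofList pts)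
  else
    let pts := (pvMids (min coords_a.2 coords_b.2) (max coords_a.2 coords_b.2)).map
      (fun y => (coords_a.1, y))
    if pts = [] then none else some (PySem.Set.ofList pts)

-- ===== PRECONDITION & SPEC =====
def Spec_space_in_line (coords_a : Int × Int) (coords_b : Int × Int) (out : Option (List (Int × Int))) : Prop := out = space_in_line_alt coords_a coords_b
instance (coords_a : Int × Int) (coords_b : Int × Int) (out : Option (List (Int × Int))) : Decidable (Spec_space_in_line coords_a coords_b out) := by unfold Spec_space_in_line; infer_instance

-- ===== CLAIM =====
def Claim_equal_space_in_line : Prop := ∀ (coords_a : Int × Int) (coords_b : Int × Int), Dom_space_in_line coords_a coords_b → Spec_space_in_line coords_a coords_b (space_in_line coords_a coords_b)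

-- ===== LEMMAS AND PROOFS =====

-- the divide-and-conquer midpoint recursion produces exactly the ascending range
lemma pvMids_eq_pyRange (lo hi : Int) : pvMids lo hi = PySem.List.pyRange (lo + 1) hi 1 := by
  by_cases h : hi - lo < 2
  · rw [pvMids, dif_pos h, PySem.List.pyRange_one_eq_nil (by omega)]
  · rw [pvMids, dif_neg h]
    have hm : PySem.Int.floordiv (lo + hi) 2 = (lo + hi) / 2 :=
      PySem.Int.floordiv_eq_ediv_of_pos (by omega)
    show pvMids lo (PySem.Int.floordiv (lo + hi) 2) ++
        PySem.Int.floordiv (lo + hi) 2 :: pvMids (PySem.Int.floordiv (lo + hi) 2) hi =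
        PySem.List.pyRange (lo + 1) hi 1
    rw [hm]
    have hlo : lo < (lo + hi) / 2 := by omega
    have hhi : (lo + hi) / 2 < hi := by omega
    rw [pvMids_eq_pyRange lo ((lo + hi) / 2), pvMids_eq_pyRange ((lo + hi) / 2) hi,
      ← PySem.List.pyRange_one_cons hhi,
      ← PySem.List.pyRange_one_append (lo + 1) ((lo + hi) / 2) hi (by omega) (by omega)]
termination_by (hi - lo).toNat
decreasing_by
  all_goals omega

-- ===== VERDICT =====
theorem space_in_line_spec : Claim_equal_space_in_line := by
  intro a b _
  unfold Spec_space_in_line space_in_line space_in_line_alt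
  obtain ⟨ax, ay⟩ := a
  obtain ⟨bx, by'⟩ := b
  simp only [pvMids_eq_pyRange]
  by_cases hy : ay = by'
  · subst hy
    simp only [ne_eq, not_true_eq_false, and_false, if_false, if_true]
    by_cases hlt : min ax bx + 1 < max ax bx
    · have hne : (PySem.List.pyRange (min ax bx + 1) (max ax bx) 1).map
          (fun x => (x, ay)) ≠ [] := by
        simp [PySem.List.pyRange_one_cons hlt]
      rw [if_pos hlt, if_neg hne]
    · have he : PySem.List.pyRange (min ax bx + 1) (max ax bx) 1 = [] :=
        PySem.List.pyRange_one_eq_nil (by omega)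
      rw [if_neg hlt, he]
      simp
  · simp only [if_neg hy]
    by_cases hx : ax = bx
    · subst hx
      simp only [ne_eq, not_true_eq_false, false_and, if_false, if_true]
      by_cases hlt : min ay by' + 1 < max ay by'
      · have hne : (PySem.List.pyRange (min ay by' + 1) (max ay by') 1).map
            (fun y => (ax, y)) ≠ [] := by
          simp [PySem.List.pyRange_one_cons hlt]
        rw [if_pos hlt, if_neg hne]
      · have he : PySem.List.pyRange (min ay by' + 1) (max ay by') 1 = [] :=
          PySem.List.pyRange_one_eq_nil (by omega)
        rw [if_neg hlt, he]
        simp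
    · simp [hx, hy]
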